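-- pv_equiv track=rewrite | github.com/onlythompson/master_python_thinking | arrays_and_strings/code_challenges/cracking_the_code_interview/anagrams.py | anagram_optimized
-- ===== SOURCE A (Python) =====
-- from collections import Counter
--
-- def anagram_optimized(s:str, t:str):
--     freq_s = Counter(s) # Count the frequency of each character in the string s.
--     for c in t: # Loop through the characters in the string t.
--         if c not in freq_s:
--             return False
--         else:
--             freq_s[c] -= 1 # Decrement the frequency of the character.
--             if freq_s[c] == -1: # If the frequency is less than 0, return False.
--                 return False
--     return True
-- ===== SOURCE B (Python) =====
-- from collections import Counter
--
-- def anagram_optimized(s: str, t: str):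
--     cs = Counter(s)
--     return all(v <= cs[c] for c, v in Counter(t).items())
-- ===== Notes on version B (the rewrite author's own statement) =====
-- stated objective: idiomatic
-- what changed: Replaces A's streaming per-character decrement loop over t (with early exit) by building both frequency tables and checking Counter(t) is a sub-multiset of Counter(s).
import Mathlib
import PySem

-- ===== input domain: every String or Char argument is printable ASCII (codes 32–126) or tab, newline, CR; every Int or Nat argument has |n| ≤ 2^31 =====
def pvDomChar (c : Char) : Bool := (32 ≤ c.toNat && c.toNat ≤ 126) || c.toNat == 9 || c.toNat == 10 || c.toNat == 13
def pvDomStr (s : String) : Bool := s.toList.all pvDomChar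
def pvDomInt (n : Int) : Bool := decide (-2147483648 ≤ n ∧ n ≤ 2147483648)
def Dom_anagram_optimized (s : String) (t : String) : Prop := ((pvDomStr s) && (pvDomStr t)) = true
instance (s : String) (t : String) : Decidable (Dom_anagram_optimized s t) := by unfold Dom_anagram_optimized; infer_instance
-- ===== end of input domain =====

-- B rewrites A's streaming decrement loop (early exit per character of t) as a
-- two-table multiset comparison: every count of Counter(t) is ≤ its count in Counter(s).

-- ===== PORT A =====
-- the 'for c in t' loop, carrying the mutated Counter of s
def anagramGo (d : PySem.Dict Char Int) : List Char → Bool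
  | [] => true
  | c :: rest =>
    if d.contains c = false then false     -- if c not in freq_s: return False
    else
      let d' := d.modify c 0 (· - 1)       -- freq_s[c] -= 1
      if d'.getD c 0 = -1 then false       -- if freq_s[c] == -1: return False
      else anagramGo d' rest

def anagram_optimized (s : String) (t : String) : Bool :=
  anagramGo (PySem.Dict.counter s.toList) t.toList

-- ===== PORT B =====
def anagram_optimized_alt (s : String) (t : String) : Bool :=
  let cs := PySem.Dict.counter s.toList
  (PySem.Dict.counter t.toList).items.all (fun p => decide (p.2 ≤ cs.getD p.1 0))

-- ===== PRECONDITION & SPEC =====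
def Spec_anagram_optimized (s : String) (t : String) (out : Bool) : Prop := out = anagram_optimized_alt s t
instance (s : String) (t : String) (out : Bool) : Decidable (Spec_anagram_optimized s t out) := by unfold Spec_anagram_optimized; infer_instance

-- ===== CLAIM (what is proved, stated in full; the proofs are below) =====
def Claim_equal_anagram_optimized : Prop := ∀ (s : String) (t : String), Dom_anagram_optimized s t → Spec_anagram_optimized s t (anagram_optimized s t)

-- ===== LEMMAS AND PROOFS =====

-- A's loop, on a table with no negative counts, succeeds iff every character's
-- count in the remaining list fits under its current table entry.
theorem anagramGo_iff (l : List Char) (d : PySem.Dict Char Int)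
    (hnn : ∀ c, 0 ≤ d.getD c 0) :
    (anagramGo d l = true ↔ ∀ c, (List.count c l : Int) ≤ d.getD c 0) := by
  induction l generalizing d with
  | nil => simpa [anagramGo] using hnn
  | cons c rest ih =>
    simp only [anagramGo]
    by_cases hc : d.contains c = false
    · have h0 : d.getD c 0 = 0 := PySem.Dict.getD_of_not_contains d 0 hc
      rw [if_pos hc]
      constructor
      · intro h; cases h
      · intro h
        have := h c
        rw [h0, List.count_cons_self] at this
        omega
    · rw [if_neg hc, PySem.Dict.getD_modify_self]
      by_cases hz : d.getD c 0 = 0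
      · rw [if_pos (show d.getD c 0 - 1 = -1 by omega)]
        constructor
        · intro h; cases h
        · intro h
          have := h c
          rw [hz, List.count_cons_self] at this
          omega
      · have hv1 : 0 < d.getD c 0 := lt_of_le_of_ne (hnn c) (Ne.symm hz)
        rw [if_neg (show d.getD c 0 - 1 ≠ -1 by omega)]
        have hnn' : ∀ c', 0 ≤ (d.modify c 0 (· - 1)).getD c' 0 := by
          intro c'
          rw [PySem.Dict.getD_modify]
          split_ifs with h
          · omega
          · exact hnn c'
        rw [ih _ hnn']
        constructor
        · intro h c'
          have := h c'
          rw [PySem.Dict.getD_modify] at this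
          rcases eq_or_ne c' c with rfl | hcc
          · rw [if_pos rfl] at this
            rw [List.count_cons_self]
            push_cast
            omega
          · rw [if_neg hcc] at this
            rw [List.count_cons_of_ne hcc.symm]
            exact this
        · intro h c'
          rw [PySem.Dict.getD_modify]
          have := h c'
          rcases eq_or_ne c' c with rfl | hcc
          · rw [if_pos rfl]
            rw [List.count_cons_self] at this
            push_cast at this ⊢
            omega
          · rw [if_neg hcc]
            rw [List.count_cons_of_ne hcc.symm] at this
            exact this

-- B's `all` over Counter(t).items quantifies the distinct characters of t;
-- characters outside t contribute count 0, so it is the same universal bound.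
theorem alt_eq_true_iff (s t : String) :
    (anagram_optimized_alt s t = true
      ↔ ∀ c, (List.count c t.toList : Int) ≤ (List.count c s.toList : Int)) := by
  unfold anagram_optimized_alt
  rw [PySem.Dict.items_counter]
  simp only [List.all_map, List.all_eq_true, Function.comp, decide_eq_true_eq,
    PySem.Dict.getD_counter, PySem.Set.mem_ofList]
  constructor
  · intro h c
    by_cases hc : c ∈ t.toList
    · exact h c hc
    · rw [List.count_eq_zero_of_not_mem hc]
      positivity
  · intro h c _
    exact h c

-- ===== VERDICT (by name: the statement is the Claim_ definition above) =====
theorem anagram_optimized_spec : Claim_equal_anagram_optimized := by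
  intro s t _
  unfold Spec_anagram_optimized anagram_optimized
  have h1 := anagramGo_iff t.toList (PySem.Dict.counter s.toList)
    (by intro c; rw [PySem.Dict.getD_counter]; positivity)
  simp only [PySem.Dict.getD_counter] at h1
  rw [Bool.eq_iff_iff, h1, alt_eq_true_iff s t]
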